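-- pv_equiv track=rewrite | github.com/lauwong/6009labs | lab04/lab.py | set_value
-- ===== SOURCE A (Python) =====
-- def set_value(board, location, value=None, dim=0):
--     """
--     Recursively sets the item at a specific coordinate to the given value or
--     increments it by 1
--
--     Parameters:
--         * board (list) : an n-dimensional list containing the item to change
--         * location (tuple) : the coordinates of the item to change
--         * value : the new value of the item
--             * if value is specified, set the item to the given value
--             * if value is not specified, assume that it is the neighbor to a
--                 bomb and increment the value of the space by 1 instead
--         * dim (int) : the current recursion depth
--
--     Returns:
--         A new board with the item at index location changed to value
--     """
--
--     # Base case: if the depth has reached the final dimension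
--     # board is now an int or string, perform the value change on it
--     if dim == len(location):
--         if value:
--             board = value
--         else:
--             board += 1
--         return board
--
--     # Gets the inner list where the value has been set
--     new_board = set_value(board[location[dim]], location, value=value, dim=dim+1)
--
--     # Duplicates the board and sets the value at the given index to the new inner board
--     dupe_board = board[:]
--     dupe_board[location[dim]] = new_board
--
--     return dupe_board
-- ===== SOURCE B (Python) =====
-- def set_value(board, location, value=None, dim=0):
--     # Iterative top-down descent with path copying instead of A's recursion.
--     loc = location[dim:]
--     if not loc:
--         return value if value else board + 1
--     new_board = board[:]
--     cur = new_board
--     for idx in loc[:-1]: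
--         child = cur[idx][:]
--         cur[idx] = child
--         cur = child
--     last = loc[-1]
--     if value:
--         cur[last] = value
--     else:
--         cur[last] += 1
--     return new_board
-- ===== Notes on version B (the rewrite author's own statement) =====
-- stated objective: alternative
-- what changed: Replaces A's depth-first recursion (rebuild on the way back up) with an iterative top-down descent that copies the path while walking down and mutates the final cell; same cost, different control structure.
-- outside the precondition, e.g. on set_value([[1, 2], [3, 4]], (0, 1), 5, 2): A returns 5, B returns 5; on set_value([[1, 2], [3, 4]], (0, 1), 5, 1): A returns [[1, 2], 5], B returns [[1, 2], 5]
import Mathlib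
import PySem

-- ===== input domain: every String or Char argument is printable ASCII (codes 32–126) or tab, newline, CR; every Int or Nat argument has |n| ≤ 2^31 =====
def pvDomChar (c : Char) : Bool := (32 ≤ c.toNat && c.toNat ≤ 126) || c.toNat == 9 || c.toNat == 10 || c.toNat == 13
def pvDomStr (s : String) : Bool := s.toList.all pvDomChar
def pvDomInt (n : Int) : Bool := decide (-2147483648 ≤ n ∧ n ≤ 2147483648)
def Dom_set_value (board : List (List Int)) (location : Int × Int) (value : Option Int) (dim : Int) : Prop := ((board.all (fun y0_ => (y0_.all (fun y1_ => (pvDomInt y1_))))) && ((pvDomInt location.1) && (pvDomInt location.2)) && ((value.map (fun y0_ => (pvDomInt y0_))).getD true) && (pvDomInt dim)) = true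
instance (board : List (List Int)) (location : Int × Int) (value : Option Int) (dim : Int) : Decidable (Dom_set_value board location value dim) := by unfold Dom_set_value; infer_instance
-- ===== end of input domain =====

-- B is an iterative top-down path-copying descent; A is a depth-first recursion that rebuilds on
-- the way back up. Equivalence is about the RETURN value (neither program mutates its arguments).

-- ===== PORT A =====
-- A's recursion crosses types (board, row, cell); under the monomorphic convention each depth is
-- its own helper, exactly mirroring A's code at that depth.
-- Depth 2 (dim == len(location)): `if value: board = value else: board += 1`
def pvA_base (cell : Int) (value : Option Int) : Int :=
  match value with
  | some v => if v ≠ 0 then v else cell + 1   -- Python truthiness: `if value:`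
  | none => cell + 1

-- Depth 1: recurse on row[location[1]], duplicate the row, set the index
def pvA_row (row : List Int) (location : Int × Int) (value : Option Int) : List Int :=
  let new_board := pvA_base (PySem.List.pyGetD row location.2 0) value
  let dupe_board := PySem.List.slice row none none
  PySem.List.pySetD dupe_board location.2 new_board

def set_value (board : List (List Int)) (location : Int × Int) (value : Option Int) (dim : Int) : List (List Int) :=
  if dim = 0 then
    let new_board := pvA_row (PySem.List.pyGetD board location.1 []) location value
    let dupe_board := PySem.List.slice board none none
    PySem.List.pySetD dupe_board location.1 new_board
  else board  -- totalization guard only: for dim ≠ 0 the Python result leaves the declared type (excluded by Pre_)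

-- ===== PORT B =====
def set_value_alt (board : List (List Int)) (location : Int × Int) (value : Option Int) (dim : Int) : List (List Int) :=
  if dim ≠ 0 then board  -- totalization guard only: for dim ≠ 0 the Python result leaves the declared type (excluded by Pre_)
  else
    -- new_board = board[:]; cur = new_board
    let new_board := PySem.List.slice board none none
    -- single loop iteration (loc[:-1] = [location[0]] here): child = cur[idx][:]; cur[idx] = child; cur = child
    let idx := location.1
    let child := PySem.List.slice (PySem.List.pyGetD new_board idx []) none none
    -- cur[last] = value if value else cur[last] + 1  (mutates child, then it is written back at idx)
    let last := location.2
    let newv := match value with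
      | some v => if v ≠ 0 then v else PySem.List.pyGetD child last 0 + 1
      | none => PySem.List.pyGetD child last 0 + 1
    let child' := PySem.List.pySetD child last newv
    PySem.List.pySetD new_board idx child'

-- ===== PRECONDITION & SPEC =====
-- Pre_ excludes: dim ≠ 0 (there A's return value leaves the declared List (List Int) type, or A
-- raises TypeError), and out-of-range coordinates (IndexError in both programs).
def Pre_set_value (board : List (List Int)) (location : Int × Int) (value : Option Int) (dim : Int) : Prop :=
  dim = 0 ∧ PySem.Raise.InRange board.length location.1 ∧
    PySem.Raise.InRange (PySem.List.pyGetD board location.1 []).length location.2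
instance (board : List (List Int)) (location : Int × Int) (value : Option Int) (dim : Int) : Decidable (Pre_set_value board location value dim) := by unfold Pre_set_value; infer_instance

def pvWitness_set_value : List (List Int) × (Int × Int) × Option Int × Int := ([[1, 2], [3, 4]], (0, 1), some 7, 0)

def Spec_set_value (board : List (List Int)) (location : Int × Int) (value : Option Int) (dim : Int) (out : List (List Int)) : Prop := out = set_value_alt board location value dim
instance (board : List (List Int)) (location : Int × Int) (value : Option Int) (dim : Int) (out : List (List Int)) : Decidable (Spec_set_value board location value dim out) := by unfold Spec_set_value; infer_instance

-- ===== CLAIM (what is proved, stated in full; the proofs are below) =====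
def Claim_equal_set_value : Prop := ∀ (board : List (List Int)) (location : Int × Int) (value : Option Int) (dim : Int), Dom_set_value board location value dim → Pre_set_value board location value dim → Spec_set_value board location value dim (set_value board location value dim)

-- ===== LEMMAS AND PROOFS =====

-- ===== VERDICT (by name: the statement is the Claim_ definition above) =====
theorem set_value_spec : Claim_equal_set_value := by
  intro board location value dim _ hpre
  obtain ⟨hdim, _, _⟩ := hpre
  subst hdim
  unfold Spec_set_value set_value set_value_alt pvA_row pvA_base
  simp only [PySem.List.slice_none_none, ite_not, if_pos]
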